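-- pv_equiv track=rewrite | github.com/Lee-HT/Lee_HT-programmers | item_pick.py | search
-- ===== SOURCE A (Python) =====
-- def search(pos,target,road,score):   #출발 -> 도착 시계 방향 거리 측정
--     if pos == target:
--         return score
--     else:
--         npos=[]
--         state=road[pos[0]][pos[1]]
--         if state == 'u':
--             npos = [pos[0]-1,pos[1]]
--         elif state == 'r':
--             npos = [pos[0],pos[1]+1]
--         elif state == 'd':
--             npos = [pos[0]+1,pos[1]]
--         else:
--             npos = [pos[0],pos[1]-1]
--         return search(npos,target,road,score+1)
-- ===== SOURCE B (Python) =====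
-- def search(pos, target, road, score):
--     deltas = {'u': (-1, 0), 'r': (0, 1), 'd': (1, 0)}
--     while pos != target:
--         di, dj = deltas.get(road[pos[0]][pos[1]], (0, -1))
--         pos = [pos[0] + di, pos[1] + dj]
--         score += 1
--     return score
-- ===== Notes on version B (the rewrite author's own statement) =====
-- stated objective: idiomatic
-- what changed: Replaces tail recursion with an if/elif direction chain by an iterative while loop that dispatches through a direction-delta dictionary and rebinds pos (no recursion, no per-step branch ladder).
import Mathlib
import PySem

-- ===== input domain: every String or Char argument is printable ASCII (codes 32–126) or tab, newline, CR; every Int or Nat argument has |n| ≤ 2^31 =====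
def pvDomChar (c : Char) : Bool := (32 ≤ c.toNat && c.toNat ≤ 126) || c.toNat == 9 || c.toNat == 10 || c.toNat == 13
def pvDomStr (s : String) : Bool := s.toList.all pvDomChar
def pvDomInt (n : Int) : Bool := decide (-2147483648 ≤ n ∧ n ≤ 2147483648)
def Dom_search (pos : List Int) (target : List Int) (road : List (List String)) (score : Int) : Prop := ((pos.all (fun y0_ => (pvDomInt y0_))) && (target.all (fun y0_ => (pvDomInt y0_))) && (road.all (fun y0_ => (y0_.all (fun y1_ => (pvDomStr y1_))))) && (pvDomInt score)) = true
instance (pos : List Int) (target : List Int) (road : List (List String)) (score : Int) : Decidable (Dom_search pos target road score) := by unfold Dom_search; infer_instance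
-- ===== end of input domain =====

-- B rewrites A's tail recursion with an if/elif chain as an iterative loop dispatching through a
-- direction-delta dictionary; return values agree on every input on which A terminates normally (Pre_).
-- Both ports are fuel-bounded transcriptions (fuel = number of cells + 1, enough for every terminating run).

-- ===== PORT A =====
-- A's recursion, step for step: base check, read state, if/elif chain building npos, recurse with score+1.
-- Fuel bounds the recursion depth; on fuel exhaustion or an out-of-range index (Python raises there,
-- excluded by Pre_) it returns score.
def searchGo (target : List Int) (road : List (List String)) : Nat → List Int → Int → Int
  | 0, _, score => score
  | n+1, pos, score =>
    if pos = target then score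
    else
      match PySem.List.pyGet? pos 0 with
      | none => score
      | some i =>
        match PySem.List.pyGet? pos 1 with
        | none => score
        | some j =>
          match PySem.List.pyGet? road i with
          | none => score
          | some row =>
            match PySem.List.pyGet? row j with
            | none => score
            | some state =>
              let npos : List Int :=
                if state = "u" then [i - 1, j]
                else if state = "r" then [i, j + 1]
                else if state = "d" then [i + 1, j]
                else [i, j - 1]
              searchGo target road n npos (score + 1)

def search (pos : List Int) (target : List Int) (road : List (List String)) (score : Int) : Int :=
  searchGo target road (road.flatten.length + 1) pos score

-- ===== PORT B =====
def altDeltas : PySem.Dict String (Int × Int) :=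
  PySem.Dict.mk [("u", (-1, 0)), ("r", (0, 1)), ("d", (1, 0))]

-- B's while loop: one combined cell read, delta looked up in the dictionary, pos rebound, score incremented.
def altLoop (target : List Int) (road : List (List String)) : Nat → List Int → Int → Int
  | 0, _, score => score
  | n+1, pos, score =>
    if pos = target then score
    else
      match (do
        let i ← PySem.List.pyGet? pos 0
        let j ← PySem.List.pyGet? pos 1
        let row ← PySem.List.pyGet? road i
        let s ← PySem.List.pyGet? row j
        pure (i, j, s) : Option (Int × Int × String)) with
      | none => score
      | some (i, j, s) =>
        let d := PySem.Dict.getD altDeltas s (0, -1)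
        altLoop target road n [i + d.1, j + d.2] (score + 1)

def search_alt (pos : List Int) (target : List Int) (road : List (List String)) (score : Int) : Int :=
  altLoop target road (road.flatten.length + 1) pos score

-- ===== PRECONDITION & SPEC =====
-- one deterministic step of the path (none = Python IndexError at that cell)
def pvStep? (road : List (List String)) (p : List Int) : Option (List Int) := do
  let i ← PySem.List.pyGet? p 0
  let j ← PySem.List.pyGet? p 1
  let row ← PySem.List.pyGet? road i
  let s ← PySem.List.pyGet? row j
  pure (if s = "u" then [i - 1, j]
        else if s = "r" then [i, j + 1]
        else if s = "d" then [i + 1, j]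
        else [i, j - 1])

def pvReach (road : List (List String)) (target : List Int) : Nat → List Int → Bool
  | 0, p => p = target
  | n+1, p => p = target ||
      (match pvStep? road p with
       | some q => pvReach road target n q
       | none => false)

-- Pre_ = exactly the inputs on which Python A returns: the path from pos reaches target through
-- in-range cells (a terminating deterministic path never revisits a cell, so it reaches target
-- within (number of cells) steps). Outside Pre_ Python A raises IndexError or never terminates.
def Pre_search (pos : List Int) (target : List Int) (road : List (List String)) (score : Int) : Prop :=
  pvReach road target road.flatten.length pos = true
instance (pos : List Int) (target : List Int) (road : List (List String)) (score : Int) : Decidable (Pre_search pos target road score) := by unfold Pre_search; infer_instance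

def pvWitness_search : List Int × List Int × List (List String) × Int :=
  ([0, 0], [1, 1], [["r", "d"], ["u", "l"]], 0)

def Spec_search (pos : List Int) (target : List Int) (road : List (List String)) (score : Int) (out : Int) : Prop := out = search_alt pos target road score
instance (pos : List Int) (target : List Int) (road : List (List String)) (score : Int) (out : Int) : Decidable (Spec_search pos target road score out) := by unfold Spec_search; infer_instance

-- ===== CLAIM (what is proved, stated in full; the proofs are below) =====
def Claim_equal_search : Prop := ∀ (pos : List Int) (target : List Int) (road : List (List String)) (score : Int), Dom_search pos target road score → Pre_search pos target road score → Spec_search pos target road score (search pos target road score)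

-- ===== LEMMAS AND PROOFS =====
-- the delta dictionary looked up with default (0,-1) is exactly A's if/elif chain
theorem altDeltas_getD (s : String) :
    PySem.Dict.getD altDeltas s (0, -1) =
      if s = "u" then (-1, 0) else if s = "r" then (0, 1) else if s = "d" then (1, 0) else (0, -1) := by
  simp only [altDeltas, PySem.Dict.getD, PySem.Dict.get?]
  split_ifs with hA hB hC
  · subst hA; decide
  · subst hB; decide
  · subst hC; decide
  · simp [List.find?, beq_eq_false_iff_ne.2 (Ne.symm hA), beq_eq_false_iff_ne.2 (Ne.symm hB),
      beq_eq_false_iff_ne.2 (Ne.symm hC)]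

-- the two loop bodies agree step for step, hence the loops agree for every fuel
theorem searchGo_eq_altLoop (target : List Int) (road : List (List String)) :
    ∀ (n : Nat) (pos : List Int) (score : Int),
      searchGo target road n pos score = altLoop target road n pos score := by
  intro n
  induction n with
  | zero => intro pos score; rfl
  | succ n ih =>
    intro pos score
    simp only [searchGo, altLoop]
    by_cases hpt : pos = target
    · simp [hpt]
    · simp only [if_neg hpt]
      cases h0 : PySem.List.pyGet? pos 0 with
      | none => simp [Option.bind]
      | some i =>
        cases h1 : PySem.List.pyGet? pos 1 with
        | none => simp [Option.bind, h1]
        | some j =>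
          cases h2 : PySem.List.pyGet? road i with
          | none => simp [Option.bind, h2]
          | some row =>
            cases h3 : PySem.List.pyGet? row j with
            | none => simp [Option.bind, h2, h3]
            | some s =>
              simp only [Option.bind, h2, h3, bind, pure]
              rw [ih, altDeltas_getD]
              congr 1
              by_cases hu : s = "u"
              · simp [hu]; omega
              · by_cases hr : s = "r"
                · simp [hr]
                · by_cases hd : s = "d"
                  · simp [hu, hr, hd]
                  · simp [hu, hr, hd]; omega

-- ===== VERDICT (by name: the statement is the Claim_ definition above) =====
theorem search_spec : Claim_equal_search := by
  intro pos target road score _ _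
  unfold Spec_search search search_alt
  exact searchGo_eq_altLoop target road _ pos score
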